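-- pv_equiv track=rewrite | github.com/aaronbae/leetcode | codesignal/asana/taskstypes.py | tasksTypes
-- ===== SOURCE A (Python) =====
-- def tasksTypes(deadlines, day):
--   result = [0, 0, 0]
--   for n in deadlines:
--     if n <= day:
--       result[0] += 1
--     elif n <= day + 7:
--       result[1] += 1
--     else:
--       result[2] += 1
--   return result
-- ===== SOURCE B (Python) =====
-- def _bisect_right(s, x):
--     lo, hi = 0, len(s)
--     while lo < hi:
--         mid = (lo + hi) // 2
--         if x < s[mid]:
--             hi = mid
--         else:
--             lo = mid + 1
--     return lo
--
-- def tasksTypes(deadlines, day):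
--     s = sorted(deadlines)
--     a = _bisect_right(s, day)
--     b = _bisect_right(s, day + 7)
--     return [a, b - a, len(s) - b]
-- ===== Notes on version B (the rewrite author's own statement) =====
-- stated objective: alternative
-- what changed: Replaces the per-element if/elif/else counting pass with sort-then-binary-search: two bisect_right boundary lookups on the sorted list give the cumulative counts, and the three bucket sizes are their differences.
import Mathlib
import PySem

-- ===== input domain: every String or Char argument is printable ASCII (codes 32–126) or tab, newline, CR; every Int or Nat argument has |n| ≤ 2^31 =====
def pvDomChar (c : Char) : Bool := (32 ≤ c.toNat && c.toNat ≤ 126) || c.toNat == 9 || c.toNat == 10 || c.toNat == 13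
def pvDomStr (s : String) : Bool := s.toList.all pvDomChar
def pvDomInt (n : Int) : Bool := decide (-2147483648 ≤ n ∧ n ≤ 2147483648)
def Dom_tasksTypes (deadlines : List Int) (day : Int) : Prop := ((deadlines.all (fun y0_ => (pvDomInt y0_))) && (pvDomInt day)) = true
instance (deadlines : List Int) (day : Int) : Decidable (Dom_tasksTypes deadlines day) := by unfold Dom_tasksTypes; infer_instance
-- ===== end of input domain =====

-- B replaces A's per-element if/elif/else counting pass with sort + two binary-search boundary lookups (alternative algorithm, not claimed faster).


-- ===== PORT A =====
-- literal port: mutable 3-list of counters, updated per element with if/elif/else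
def tasksTypes (deadlines : List Int) (day : Int) : List Int :=
  deadlines.foldl (fun result n =>
    if n ≤ day then result.set 0 (result.getD 0 0 + 1)
    else if n ≤ day + 7 then result.set 1 (result.getD 1 0 + 1)
    else result.set 2 (result.getD 2 0 + 1)) [0, 0, 0]

-- ===== PORT B =====
-- hand-written bisect_right of Source B: binary search while-loop on [lo, hi)
def bsrLoop (s : List Int) (x : Int) (lo hi : Nat) : Nat :=
  if _h : lo < hi then
    let mid := (lo + hi) / 2
    if x < s.getD mid 0 then bsrLoop s x lo mid
    else bsrLoop s x (mid + 1) hi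
  else lo
termination_by hi - lo
decreasing_by all_goals omega

def tasksTypes_alt (deadlines : List Int) (day : Int) : List Int :=
  let s := PySem.List.sorted deadlines (fun x => x) false
  let a := bsrLoop s day 0 s.length
  let b := bsrLoop s (day + 7) 0 s.length
  [(a : Int), (b : Int) - (a : Int), (s.length : Int) - (b : Int)]

-- ===== PRECONDITION & SPEC =====
def Spec_tasksTypes (deadlines : List Int) (day : Int) (out : List Int) : Prop := out = tasksTypes_alt deadlines day
instance (deadlines : List Int) (day : Int) (out : List Int) : Decidable (Spec_tasksTypes deadlines day out) := by unfold Spec_tasksTypes; infer_instance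

-- ===== CLAIM (what is proved, stated in full; the proofs are below) =====
def Claim_equal_tasksTypes : Prop := ∀ (deadlines : List Int) (day : Int), Dom_tasksTypes deadlines day → Spec_tasksTypes deadlines day (tasksTypes deadlines day)

-- ===== LEMMAS AND PROOFS =====

theorem bsrLoop_lt (s : List Int) (x : Int) (lo hi : Nat) (h : lo < hi) :
    bsrLoop s x lo hi =
      if x < s.getD ((lo + hi) / 2) 0 then bsrLoop s x lo ((lo + hi) / 2)
      else bsrLoop s x ((lo + hi) / 2 + 1) hi := by
  rw [bsrLoop]; simp [h]

theorem bsrLoop_ge (s : List Int) (x : Int) (lo hi : Nat) (h : ¬ lo < hi) :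
    bsrLoop s x lo hi = lo := by
  rw [bsrLoop]; simp [h]

-- invariant of the binary-search loop
theorem bsrLoop_inv (s : List Int) (x : Int) (hs : s.Pairwise (fun a b => a ≤ b)) :
    ∀ (n lo hi : Nat), hi - lo = n → lo ≤ hi → hi ≤ s.length →
    (∀ j (hj : j < s.length), j < lo → s[j] ≤ x) →
    (∀ j (hj : j < s.length), hi ≤ j → x < s[j]) →
    bsrLoop s x lo hi ≤ s.length ∧
    (∀ j (hj : j < s.length), j < bsrLoop s x lo hi → s[j] ≤ x) ∧
    (∀ j (hj : j < s.length), bsrLoop s x lo hi ≤ j → x < s[j]) := by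
  have hget : ∀ i j (hi : i < s.length) (hj : j < s.length), i ≤ j → s[i] ≤ s[j] := by
    intro i j hi hj hij
    rcases Nat.eq_or_lt_of_le hij with h | h
    · subst h; exact le_refl _
    · exact (List.pairwise_iff_getElem.mp hs) i j hi hj h
  intro n
  induction n using Nat.strong_induction_on with
  | _ n ih =>
    intro lo hi hn hlohi hhi h1 h2
    by_cases h : lo < hi
    · have hmidlt : (lo + hi) / 2 < hi := by omega
      have hmidge : lo ≤ (lo + hi) / 2 := by omega
      have hmids : (lo + hi) / 2 < s.length := by omega
      have hgd : s.getD ((lo + hi) / 2) 0 = s[(lo + hi) / 2] := List.getD_eq_getElem s 0 hmids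
      rcases lt_or_ge x (s.getD ((lo + hi) / 2) 0) with hx | hx
      · rw [bsrLoop_lt s x lo hi h, if_pos hx]
        refine ih ((lo + hi) / 2 - lo) (by omega) lo ((lo + hi) / 2) rfl hmidge (by omega) h1 ?_
        intro j hj hji
        have := hget _ _ hmids hj hji
        rw [hgd] at hx
        omega
      · rw [bsrLoop_lt s x lo hi h, if_neg (not_lt.mpr hx)]
        refine ih (hi - ((lo + hi) / 2 + 1)) (by omega) ((lo + hi) / 2 + 1) hi rfl (by omega) hhi ?_ h2
        intro j hj hji
        have := hget _ _ hj hmids (by omega)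
        rw [hgd] at hx
        omega
    · have hle : lo = hi := by omega
      subst hle
      rw [bsrLoop_ge s x lo lo h]
      exact ⟨by omega, h1, h2⟩

-- a position characterised by "everything below ≤ x, everything from it on > x" is the countP of (· ≤ x)
theorem countP_eq_of_char (x : Int) : ∀ (s : List Int) (k : Nat), k ≤ s.length →
    (∀ j (hj : j < s.length), j < k → s[j] ≤ x) →
    (∀ j (hj : j < s.length), k ≤ j → x < s[j]) →
    s.countP (fun n => decide (n ≤ x)) = k := by
  intro s
  induction s with
  | nil => intro k hk _ _; simp at hk; simpa using hk.symm
  | cons a t iht =>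
    intro k hk h1 h2
    cases k with
    | zero =>
      rw [List.countP_eq_zero.mpr]
      intro m hm
      rcases List.mem_iff_getElem.mp hm with ⟨j, hj, rfl⟩
      simpa using (h2 j hj (Nat.zero_le _))
    | succ k' =>
      have ha : a ≤ x := by simpa using h1 0 (by simp) (Nat.succ_pos _)
      have ht : t.countP (fun n => decide (n ≤ x)) = k' := by
        refine iht k' (by simpa using hk) ?_ ?_
        · intro j hj hjk
          have := h1 (j + 1) (by simpa using Nat.succ_lt_succ hj) (Nat.succ_lt_succ hjk)
          simpa using this
        · intro j hj hjk
          have := h2 (j + 1) (by simpa using Nat.succ_lt_succ hj) (Nat.succ_le_succ hjk)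
          simpa using this
      simp [ha, ht]

theorem bsr_eq_countP (s : List Int) (x : Int) (hs : s.Pairwise (fun a b => a ≤ b)) :
    bsrLoop s x 0 s.length = s.countP (fun n => decide (n ≤ x)) := by
  have h := bsrLoop_inv s x hs (s.length - 0) 0 s.length rfl (Nat.zero_le _) (le_refl _)
    (by intro j hj hj0; omega) (by intro j hj hjl; omega)
  exact (countP_eq_of_char x s _ h.1 h.2.1 h.2.2).symm

-- A's fold computes the three bucket counts
theorem A_fold (day : Int) : ∀ (ds : List Int) (x y z : Int),
    ds.foldl (fun result n =>
      if n ≤ day then result.set 0 (result.getD 0 0 + 1)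
      else if n ≤ day + 7 then result.set 1 (result.getD 1 0 + 1)
      else result.set 2 (result.getD 2 0 + 1)) [x, y, z]
    = [x + (ds.countP (fun n => decide (n ≤ day)) : Int),
       y + (ds.countP (fun n => decide (day < n ∧ n ≤ day + 7)) : Int),
       z + (ds.countP (fun n => decide (day + 7 < n)) : Int)] := by
  intro ds
  induction ds with
  | nil => intro x y z; simp
  | cons d t ih =>
    intro x y z
    rw [List.foldl_cons]
    by_cases h1 : d ≤ day
    · rw [show (if d ≤ day then [x, y, z].set 0 ([x, y, z].getD 0 0 + 1)
          else if d ≤ day + 7 then [x, y, z].set 1 ([x, y, z].getD 1 0 + 1)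
          else [x, y, z].set 2 ([x, y, z].getD 2 0 + 1)) = [x + 1, y, z] by simp [h1], ih]
      simp only [List.countP_cons, decide_eq_true_eq, List.cons.injEq, and_true]
      refine ⟨?_, ?_, ?_⟩ <;> split_ifs <;> push_cast <;> omega
    · by_cases h2 : d ≤ day + 7
      · rw [show (if d ≤ day then [x, y, z].set 0 ([x, y, z].getD 0 0 + 1)
            else if d ≤ day + 7 then [x, y, z].set 1 ([x, y, z].getD 1 0 + 1)
            else [x, y, z].set 2 ([x, y, z].getD 2 0 + 1)) = [x, y + 1, z] by
              simp [h2, show ¬ d ≤ day by omega], ih]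
        simp only [List.countP_cons, decide_eq_true_eq, List.cons.injEq, and_true]
        refine ⟨?_, ?_, ?_⟩ <;> split_ifs <;> push_cast <;> omega
      · rw [show (if d ≤ day then [x, y, z].set 0 ([x, y, z].getD 0 0 + 1)
            else if d ≤ day + 7 then [x, y, z].set 1 ([x, y, z].getD 1 0 + 1)
            else [x, y, z].set 2 ([x, y, z].getD 2 0 + 1)) = [x, y, z + 1] by
              simp [show ¬ d ≤ day by omega, show ¬ d ≤ day + 7 by omega], ih]
        simp only [List.countP_cons, decide_eq_true_eq, List.cons.injEq, and_true]
        refine ⟨?_, ?_, ?_⟩ <;> split_ifs <;> push_cast <;> omega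

-- splitting the counts at the two boundaries
theorem count_split (l : List Int) (day : Int) :
    l.countP (fun n => decide (n ≤ day + 7))
      = l.countP (fun n => decide (n ≤ day)) + l.countP (fun n => decide (day < n ∧ n ≤ day + 7)) ∧
    l.length = l.countP (fun n => decide (n ≤ day + 7)) + l.countP (fun n => decide (day + 7 < n)) := by
  induction l with
  | nil => simp
  | cons a t ih =>
    simp only [List.countP_cons, List.length_cons, decide_eq_true_eq]
    split_ifs <;> omega

-- ===== VERDICT (by name: the statement is the Claim_ definition above) =====
theorem tasksTypes_spec : Claim_equal_tasksTypes := by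
  intro deadlines day _dom
  unfold Spec_tasksTypes tasksTypes tasksTypes_alt
  dsimp only
  have hperm : (PySem.List.sorted deadlines (fun x => x) false).Perm deadlines :=
    PySem.List.sorted_perm deadlines (fun x => x) false
  have hpw : (PySem.List.sorted deadlines (fun x => x) false).Pairwise (fun a b => a ≤ b) :=
    PySem.List.sorted_pairwise deadlines (fun x => x)
  rw [A_fold day deadlines 0 0 0]
  rw [bsr_eq_countP _ day hpw, bsr_eq_countP _ (day + 7) hpw,
      hperm.countP_eq, hperm.countP_eq, hperm.length_eq]
  obtain ⟨hb, hl⟩ := count_split deadlines day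
  simp only [List.cons.injEq, and_true, zero_add]
  exact ⟨trivial, by omega, by omega⟩
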